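-- pv_equiv track=rewrite | github.com/shloknatarajan/faers-212 | download_data.py | generate_periods
-- ===== SOURCE A (Python) =====
-- def generate_periods(start_year, start_quarter, end_year, end_quarter):
--     periods = []
--     quarters = ['Q1', 'Q2', 'Q3', 'Q4']
--
--     for year in range(start_year, end_year + 1):
--         start_qtr = start_quarter if year == start_year else 'Q1'
--         end_qtr = end_quarter if year == end_year else 'Q4'
--         for qtr in quarters[quarters.index(start_qtr):quarters.index(end_qtr) + 1]:
--             periods.append(f"{str(year)[-2:]}{qtr}")
--     return periods
-- ===== SOURCE B (Python) =====
-- def generate_periods(start_year, start_quarter, end_year, end_quarter):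
--     if start_year > end_year:
--         return []
--     quarters = ['Q1', 'Q2', 'Q3', 'Q4']
--     start = start_year * 4 + quarters.index(start_quarter)
--     end = end_year * 4 + quarters.index(end_quarter)
--     return [f"{str(i // 4)[-2:]}{quarters[i % 4]}" for i in range(start, end + 1)]
-- ===== Notes on version B (the rewrite author's own statement) =====
-- stated objective: alternative
-- what changed: Replaces the nested year/quarter loops with a single flat loop over absolute quarter indices (year*4 + quarter index), decoding year and quarter with divmod.
import Mathlib
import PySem

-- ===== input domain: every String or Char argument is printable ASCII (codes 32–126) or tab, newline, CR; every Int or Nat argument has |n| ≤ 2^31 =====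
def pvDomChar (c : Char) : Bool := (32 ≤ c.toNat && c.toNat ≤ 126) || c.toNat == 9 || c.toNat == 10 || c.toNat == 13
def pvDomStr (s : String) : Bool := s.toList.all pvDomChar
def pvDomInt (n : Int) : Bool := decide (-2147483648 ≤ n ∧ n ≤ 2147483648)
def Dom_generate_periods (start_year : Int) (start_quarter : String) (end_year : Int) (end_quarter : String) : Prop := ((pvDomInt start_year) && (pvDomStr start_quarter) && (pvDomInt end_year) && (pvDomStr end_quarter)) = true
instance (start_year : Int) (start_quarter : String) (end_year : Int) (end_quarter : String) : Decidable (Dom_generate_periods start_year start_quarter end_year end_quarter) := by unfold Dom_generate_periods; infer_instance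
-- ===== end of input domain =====

-- B replaces the nested year/quarter loops by one flat loop over absolute quarter
-- indices (year*4 + quarter index); same cost, different decomposition.

-- ===== PORT A =====
def pyQuartersA : List String := ["Q1", "Q2", "Q3", "Q4"]

def generate_periods (start_year : Int) (start_quarter : String) (end_year : Int) (end_quarter : String) : List String :=
  (PySem.List.pyRange start_year (end_year + 1) 1).foldl (fun periods year =>
    let start_qtr := if year = start_year then start_quarter else "Q1"
    let end_qtr := if year = end_year then end_quarter else "Q4"
    -- quarters.index raises ValueError on a missing quarter: none here, excluded by Pre_
    match PySem.List.index? pyQuartersA start_qtr, PySem.List.index? pyQuartersA end_qtr with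
    | some i, some j =>
        (PySem.List.slice pyQuartersA (some (i : Int)) (some ((j : Int) + 1))).foldl
          (fun ps qtr => ps ++ [PySem.Str.slice (PySem.Int.toStr year) (some (-2)) none ++ qtr]) periods
    | _, _ => periods) []

-- ===== PORT B =====
def pyQuartersB : List String := ["Q1", "Q2", "Q3", "Q4"]

def generate_periods_alt (start_year : Int) (start_quarter : String) (end_year : Int) (end_quarter : String) : List String :=
  if start_year > end_year then []
  else
    -- quarters.index raises ValueError on a missing quarter: none here, excluded by Pre_
    match PySem.List.index? pyQuartersB start_quarter with
    | none => []
    | some a =>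
        match PySem.List.index? pyQuartersB end_quarter with
        | none => []
        | some b =>
            (PySem.List.pyRange (start_year * 4 + a) (end_year * 4 + b + 1) 1).map (fun i =>
              PySem.Str.slice (PySem.Int.toStr (PySem.Int.floordiv i 4)) (some (-2)) none
                ++ PySem.List.pyGetD pyQuartersB (PySem.Int.mod i 4) "")

-- ===== PRECONDITION & SPEC =====
-- Pre_ excludes exactly the inputs where A raises ValueError: a non-empty year range
-- whose start (resp. end) quarter string is not one of 'Q1'..'Q4'.
def Pre_generate_periods (start_year : Int) (start_quarter : String) (end_year : Int) (end_quarter : String) : Prop :=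
  start_year ≤ end_year → (start_quarter ∈ (["Q1", "Q2", "Q3", "Q4"] : List String) ∧ end_quarter ∈ (["Q1", "Q2", "Q3", "Q4"] : List String))
instance (start_year : Int) (start_quarter : String) (end_year : Int) (end_quarter : String) : Decidable (Pre_generate_periods start_year start_quarter end_year end_quarter) := by unfold Pre_generate_periods; infer_instance

def pvWitness_generate_periods : Int × String × Int × String := (2023, "Q2", 2024, "Q1")

def Spec_generate_periods (start_year : Int) (start_quarter : String) (end_year : Int) (end_quarter : String) (out : List String) : Prop := out = generate_periods_alt start_year start_quarter end_year end_quarter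
instance (start_year : Int) (start_quarter : String) (end_year : Int) (end_quarter : String) (out : List String) : Decidable (Spec_generate_periods start_year start_quarter end_year end_quarter out) := by unfold Spec_generate_periods; infer_instance

-- ===== CLAIM (what is proved, stated in full; the proofs are below) =====
def Claim_equal_generate_periods : Prop := ∀ (start_year : Int) (start_quarter : String) (end_year : Int) (end_quarter : String), Dom_generate_periods start_year start_quarter end_year end_quarter → Pre_generate_periods start_year start_quarter end_year end_quarter → Spec_generate_periods start_year start_quarter end_year end_quarter (generate_periods start_year start_quarter end_year end_quarter)

-- ===== LEMMAS AND PROOFS =====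

-- the string built for one period: two-digit year suffix ++ quarter name
def pvPer (y : Int) (q : String) : String :=
  PySem.Str.slice (PySem.Int.toStr y) (some (-2)) none ++ q

-- B's element function on an absolute quarter index
def pvF (i : Int) : String :=
  PySem.Str.slice (PySem.Int.toStr (PySem.Int.floordiv i 4)) (some (-2)) none
    ++ PySem.List.pyGetD pyQuartersA (PySem.Int.mod i 4) ""

lemma pvFdiv4 (y : Int) (k : Nat) (hk : k < 4) : PySem.Int.floordiv (y * 4 + k) 4 = y := by
  rw [PySem.Int.floordiv_eq_iff_of_pos (by omega)]
  constructor <;> nlinarith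

lemma pvMod4 (y : Int) (k : Nat) (hk : k < 4) : PySem.Int.mod (y * 4 + k) 4 = k := by
  have h := PySem.Int.floordiv_mul_add_mod (y * 4 + k) 4
  rw [pvFdiv4 y k hk] at h
  omega

lemma pvF_at (y : Int) (k : Nat) (hk : k < 4) :
    pvF (y * 4 + k) = pvPer y (PySem.List.pyGetD pyQuartersA (k : Int) "") := by
  unfold pvF pvPer
  rw [pvFdiv4 y k hk, pvMod4 y k hk]

lemma pvFlatMap_congr {α β : Type} {l : List α} {f g : α → List β}
    (h : ∀ x ∈ l, f x = g x) : l.flatMap f = l.flatMap g := by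
  induction l with
  | nil => rfl
  | cons x xs ih =>
      simp only [List.flatMap_cons]
      rw [h x (by simp), ih (fun y hy => h y (by simp [hy]))]

-- one year's block of A equals the corresponding segment of B's flat range
lemma pvYearBlock (y : Int) (a b : Nat) (ha : a ≤ 3) (hb : b ≤ 3) :
    (PySem.List.slice pyQuartersA (some (a : Int)) (some ((b : Int) + 1))).map (pvPer y)
      = (PySem.List.pyRange (y * 4 + a) (y * 4 + b + 1) 1).map pvF := by
  have hcast : ((b : Int) + 1) = ((b + 1 : Nat) : Int) := by push_cast; ring
  rw [hcast, PySem.List.slice_natCast, PySem.List.pyRange_one]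
  have hlen : (y * 4 + ↑b + 1 - (y * 4 + ↑a)).toNat = b + 1 - a := by omega
  rw [hlen]
  apply List.ext_getElem
  · simp [pyQuartersA]
    omega
  · intro k h1 h2
    have hk : k < b + 1 - a := by
      simp [pyQuartersA] at h1
      omega
    have hak : a + k < 4 := by omega
    simp only [List.getElem_map, List.getElem_take, List.getElem_drop, List.getElem_range]
    have harg : y * 4 + ↑a + ↑k = y * 4 + ((a + k : Nat) : Int) := by push_cast; ring
    rw [harg, pvF_at y (a + k) hak]
    congr 1
    rw [PySem.List.pyGetD_natCast]
    simp [List.getD, List.getElem?_eq_getElem (by simp [pyQuartersA]; omega : a + k < pyQuartersA.length)]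

-- A rewritten as a flatMap over the year range, quarters given by their indices
def pvGpA (sy ey : Int) (a b : Nat) : List String :=
  (PySem.List.pyRange sy (ey + 1) 1).flatMap (fun y =>
    (PySem.List.slice pyQuartersA (some (((if y = sy then a else 0) : Nat) : Int))
        (some ((((if y = ey then b else 3) : Nat) : Int) + 1))).map (pvPer y))

lemma pvA_eq_gpA (sy ey : Int) (sq eq : String) (a b : Nat)
    (hsq : PySem.List.index? pyQuartersA sq = some a)
    (heq : PySem.List.index? pyQuartersA eq = some b) :
    generate_periods sy sq ey eq = pvGpA sy ey a b := by
  unfold generate_periods pvGpA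
  simp only [PySem.List.foldl_append_singleton_eq_map,
    apply_ite (PySem.List.index? pyQuartersA), hsq, heq,
    show PySem.List.index? pyQuartersA "Q1" = some 0 from rfl,
    show PySem.List.index? pyQuartersA "Q4" = some 3 from rfl,
    ← apply_ite Option.some]
  rw [PySem.List.foldl_append_eq_flatMap]
  rfl

-- the main induction: A's per-year blocks chain into B's single flat range
lemma pvChain (n : Nat) : ∀ (sy ey : Int) (a b : Nat), a ≤ 3 → b ≤ 3 → sy ≤ ey → (ey - sy).toNat = n →
    pvGpA sy ey a b = (PySem.List.pyRange (sy * 4 + a) (ey * 4 + b + 1) 1).map pvF := by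
  induction n with
  | zero =>
      intro sy ey a b ha hb hle hn
      have heq : ey = sy := by omega
      subst heq
      unfold pvGpA
      rw [PySem.List.pyRange_one_cons (by omega), PySem.List.pyRange_one_eq_nil (by omega)]
      simp only [List.flatMap_cons, List.flatMap_nil, List.append_nil, if_true]
      exact pvYearBlock _ a b ha hb
  | succ m ih =>
      intro sy ey a b ha hb hle hn
      have hlt : sy < ey := by omega
      unfold pvGpA
      rw [PySem.List.pyRange_one_cons (by omega)]
      simp only [List.flatMap_cons, if_true,
        if_neg (show ¬ sy = ey by omega)]
      have hrest :
          (PySem.List.pyRange (sy + 1) (ey + 1) 1).flatMap (fun y =>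
            (PySem.List.slice pyQuartersA (some (((if y = sy then a else 0) : Nat) : Int))
                (some ((((if y = ey then b else 3) : Nat) : Int) + 1))).map (pvPer y))
            = pvGpA (sy + 1) ey 0 b := by
        unfold pvGpA
        apply pvFlatMap_congr
        intro y hy
        have hy' : sy + 1 ≤ y := (PySem.List.mem_pyRange_one.mp hy).1
        rw [if_neg (by omega : ¬ y = sy), ite_self]
      have hih := ih (sy + 1) ey 0 b (by omega) hb (by omega) (by omega)
      rw [hrest, hih]
      have hblock := pvYearBlock sy a 3 ha (by omega)
      rw [PySem.List.pyRange_one_append (sy * 4 + a) (sy * 4 + 4) (ey * 4 + b + 1)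
        (by omega) (by omega), List.map_append]
      have h4 : (sy + 1) * 4 + (0 : Nat) = sy * 4 + 4 := by push_cast; ring
      rw [h4]
      congr 1
      rw [show sy * 4 + 4 = sy * 4 + 3 + 1 by ring]
      simpa using hblock

lemma pvB_eq (sy ey : Int) (sq eq : String) (a b : Nat)
    (hsq : PySem.List.index? pyQuartersA sq = some a)
    (heq : PySem.List.index? pyQuartersA eq = some b) (hle : sy ≤ ey) :
    generate_periods_alt sy sq ey eq = (PySem.List.pyRange (sy * 4 + a) (ey * 4 + b + 1) 1).map pvF := by
  unfold generate_periods_alt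
  rw [if_neg (by omega : ¬ sy > ey),
    show PySem.List.index? pyQuartersB sq = some a from hsq,
    show PySem.List.index? pyQuartersB eq = some b from heq]
  rfl

lemma pvIndex_lt (s : String) (a : Nat) (h : PySem.List.index? pyQuartersA s = some a) : a ≤ 3 := by
  rw [PySem.List.index?_eq_idxOf?] at h
  have := List.idxOf?_eq_some_iff.mp h
  have h2 : a < pyQuartersA.length := by
    rcases this with ⟨h1, _⟩
    omega
  simp [pyQuartersA] at h2
  omega

-- ===== VERDICT (by name: the statement is the Claim_ definition above) =====
theorem generate_periods_spec : Claim_equal_generate_periods := by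
  intro sy sq ey eq _ hpre
  unfold Spec_generate_periods
  by_cases hle : sy ≤ ey
  · obtain ⟨hsqm, heqm⟩ := hpre hle
    obtain ⟨a, hsq⟩ : ∃ a, PySem.List.index? pyQuartersA sq = some a := by
      cases h : PySem.List.index? pyQuartersA sq with
      | none => rw [PySem.List.index?_eq_none_iff] at h; exact absurd hsqm h
      | some a => exact ⟨a, rfl⟩
    obtain ⟨b, heq⟩ : ∃ b, PySem.List.index? pyQuartersA eq = some b := by
      cases h : PySem.List.index? pyQuartersA eq with
      | none => rw [PySem.List.index?_eq_none_iff] at h; exact absurd heqm h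
      | some b => exact ⟨b, rfl⟩
    rw [pvA_eq_gpA sy ey sq eq a b hsq heq,
      pvChain (ey - sy).toNat sy ey a b (pvIndex_lt sq a hsq) (pvIndex_lt eq b heq) hle rfl,
      pvB_eq sy ey sq eq a b hsq heq hle]
  · unfold generate_periods generate_periods_alt
    rw [PySem.List.pyRange_one_eq_nil (by omega), if_pos (by omega)]
    rfl
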